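-- pv_equiv track=rewrite | github.com/ltekean/Coding-Test | 프로그래머스/0/181829. 이차원 배열 대각선 순회하기/이차원 배열 대각선 순회하기.py | solution
-- ===== SOURCE A (Python) =====
-- def solution(board, k):
--     answer = 0
--     n_rows = len(board)
--     n_cols = len(board[0]) if board else 0  # Assuming at least one row exists
--     for i in range(n_rows):
--         for j in range(n_cols):
--             if i + j <= k:
--                 answer += board[i][j]
--     return answer
-- ===== SOURCE B (Python) =====
-- def solution(board, k):
--     n_rows = len(board)
--     n_cols = len(board[0]) if board else 0
--     answer = 0
--     for d in range(min(k + 1, n_rows + n_cols - 1)):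
--         for i in range(max(0, d - n_cols + 1), min(d, n_rows - 1) + 1):
--             answer += board[i][d - i]
--     return answer
-- ===== Notes on version B (the rewrite author's own statement) =====
-- stated objective: alternative
-- what changed: B traverses the triangular region anti-diagonal by anti-diagonal (outer loop over d = i+j up to min(k, n_rows+n_cols-2), inner loop over the valid rows of that diagonal), so the i+j<=k test disappears, instead of A's row-major scan of the whole board with a per-cell test.
import Mathlib
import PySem

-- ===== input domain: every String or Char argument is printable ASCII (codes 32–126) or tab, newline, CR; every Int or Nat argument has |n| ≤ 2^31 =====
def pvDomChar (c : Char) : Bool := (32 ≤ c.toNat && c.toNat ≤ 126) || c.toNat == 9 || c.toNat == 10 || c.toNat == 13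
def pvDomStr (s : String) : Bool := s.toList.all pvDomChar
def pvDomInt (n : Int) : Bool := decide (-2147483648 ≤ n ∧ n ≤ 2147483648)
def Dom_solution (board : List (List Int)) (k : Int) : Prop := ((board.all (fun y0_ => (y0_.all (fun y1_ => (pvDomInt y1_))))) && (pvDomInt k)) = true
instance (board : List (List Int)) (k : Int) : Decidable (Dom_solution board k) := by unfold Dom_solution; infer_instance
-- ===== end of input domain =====

-- B sums the same triangular region by anti-diagonals instead of A's row-major scan with a per-cell test.

-- ===== PORT A =====
-- row-major double loop; board[i][j] ported as pyGetD (in range under Pre_solution)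
def solution (board : List (List Int)) (k : Int) : Int :=
  let n_rows : Int := board.length
  let n_cols : Int := if board ≠ [] then ((board.headD []).length : Int) else 0
  (PySem.List.pyRange 0 n_rows 1).foldl (fun answer i =>
    (PySem.List.pyRange 0 n_cols 1).foldl (fun answer j =>
      if i + j ≤ k then answer + PySem.List.pyGetD (PySem.List.pyGetD board i []) j 0
      else answer) answer) 0

-- ===== PORT B =====
-- anti-diagonal double loop (Source B); board[i][d-i] ported as pyGetD (in range under Pre_solution)
def solution_alt (board : List (List Int)) (k : Int) : Int :=
  let n_rows : Int := board.length
  let n_cols : Int := if board ≠ [] then ((board.headD []).length : Int) else 0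
  (PySem.List.pyRange 0 (min (k + 1) (n_rows + n_cols - 1)) 1).foldl (fun answer d =>
    (PySem.List.pyRange (max 0 (d - n_cols + 1)) (min d (n_rows - 1) + 1) 1).foldl
      (fun answer i => answer + PySem.List.pyGetD (PySem.List.pyGetD board i []) (d - i) 0)
      answer) 0

-- ===== PRECONDITION & SPEC =====
-- Pre_ excludes exactly the jagged boards on which A raises IndexError: a row shorter than
-- the first row reached at some cell (i, j) with i + j ≤ k.  (B raises there too.)
def Pre_solution (board : List (List Int)) (k : Int) : Prop :=
  ∀ i ∈ List.range board.length, ∀ j ∈ List.range (board.headD []).length,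
    ((i : Int) + (j : Int) ≤ k → j < (board.getD i []).length)
instance (board : List (List Int)) (k : Int) : Decidable (Pre_solution board k) := by
  unfold Pre_solution; infer_instance
def pvWitness_solution : List (List Int) × Int := ([[1, 2], [3, 4]], 2)
def Spec_solution (board : List (List Int)) (k : Int) (out : Int) : Prop := out = solution_alt board k
instance (board : List (List Int)) (k : Int) (out : Int) : Decidable (Spec_solution board k out) := by unfold Spec_solution; infer_instance

-- ===== CLAIM (what is proved, stated in full; the proofs are below) =====
def Claim_equal_solution : Prop := ∀ (board : List (List Int)) (k : Int), Dom_solution board k → Pre_solution board k → Spec_solution board k (solution board k)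

-- ===== LEMMAS AND PROOFS =====

-- sum of h over pyRange a b 1 = Finset sum over Ico a b
lemma sum_map_pyRange (h : Int → Int) (a b : Int) :
    ((PySem.List.pyRange a b 1).map h).sum = ∑ x ∈ Finset.Ico a b, h x := by
  induction hn : (b - a).toNat generalizing a with
  | zero =>
    rw [PySem.List.pyRange_one_eq_nil (by omega), Finset.Ico_eq_empty (by omega)]
    simp
  | succ n ih =>
    rw [PySem.List.pyRange_one_cons (by omega)]
    have hins : Finset.Ico a b = insert a (Finset.Ico (a + 1) b) := by
      ext x; simp [Finset.mem_Ico, Finset.mem_insert]; omega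
    rw [hins, Finset.sum_insert (by simp)]
    simp only [List.map_cons, List.sum_cons]
    rw [ih (a + 1) (by omega)]

-- the conditional-accumulate inner loop of A as an unconditional sum of an ite
lemma foldl_if_add (l : List Int) (p : Int → Prop) [DecidablePred p] (g : Int → Int) (a : Int) :
    l.foldl (fun ans j => if p j then ans + g j else ans) a
      = a + (l.map (fun j => if p j then g j else 0)).sum := by
  have h : (fun (ans j : Int) => if p j then ans + g j else ans)
      = (fun ans j => ans + (if p j then g j else 0)) := by
    funext ans j; split_ifs <;> simp
  rw [h, PySem.List.foldl_add]

-- A's row-major double loop as a Finset double sum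
lemma double_foldl_A (R C k : Int) (g : Int → Int → Int) :
    (PySem.List.pyRange 0 R 1).foldl (fun ans i =>
        (PySem.List.pyRange 0 C 1).foldl (fun ans j =>
          if i + j ≤ k then ans + g i j else ans) ans) 0
      = ∑ i ∈ Finset.Ico 0 R, ∑ j ∈ Finset.Ico 0 C, (if i + j ≤ k then g i j else 0) := by
  rw [PySem.List.foldl_congr_mem _ _
      (fun ans i => ans + ((PySem.List.pyRange 0 C 1).map
        (fun j => if i + j ≤ k then g i j else 0)).sum) 0
      (fun acc i _ => foldl_if_add _ _ _ _),
    PySem.List.foldl_add, zero_add, sum_map_pyRange]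
  exact Finset.sum_congr rfl fun i _ => sum_map_pyRange _ _ _

-- B's anti-diagonal double loop as a Finset double sum
lemma double_foldl_B (D : Int) (lo hi : Int → Int) (h : Int → Int → Int) :
    (PySem.List.pyRange 0 D 1).foldl (fun ans d =>
        (PySem.List.pyRange (lo d) (hi d) 1).foldl (fun ans i => ans + h d i) ans) 0
      = ∑ d ∈ Finset.Ico 0 D, ∑ i ∈ Finset.Ico (lo d) (hi d), h d i := by
  rw [PySem.List.foldl_congr_mem _ _
      (fun ans d => ans + ((PySem.List.pyRange (lo d) (hi d) 1).map (h d)).sum) 0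
      (fun acc d _ => PySem.List.foldl_add _ _ _),
    PySem.List.foldl_add, zero_add, sum_map_pyRange]
  exact Finset.sum_congr rfl fun d _ => sum_map_pyRange _ _ _

-- row-major sum with a per-cell test = anti-diagonal sum without it
lemma diag_reindex (R C k : Int) (f : Int → Int → Int) :
    (∑ i ∈ Finset.Ico 0 R, ∑ j ∈ Finset.Ico 0 C, (if i + j ≤ k then f i j else 0))
      = ∑ d ∈ Finset.Ico 0 (min (k + 1) (R + C - 1)),
          ∑ i ∈ Finset.Ico (max 0 (d - C + 1)) (min d (R - 1) + 1), f i (d - i) := by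
  rw [← Finset.sum_product', ← Finset.sum_filter, Finset.sum_sigma']
  refine Finset.sum_nbij' (fun p => ⟨p.1 + p.2, p.1⟩) (fun q => (q.2, q.1 - q.2)) ?_ ?_ ?_ ?_ ?_
  · rintro ⟨i, j⟩ hm
    simp only [Finset.mem_filter, Finset.mem_product, Finset.mem_Ico] at hm
    simp only [Finset.mem_sigma, Finset.mem_Ico, lt_min_iff, max_le_iff]
    omega
  · rintro ⟨d, i⟩ hm
    simp only [Finset.mem_sigma, Finset.mem_Ico, lt_min_iff, max_le_iff] at hm
    simp only [Finset.mem_filter, Finset.mem_product, Finset.mem_Ico]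
    omega
  · rintro ⟨i, j⟩ _; simp
  · rintro ⟨d, i⟩ _; simp
  · rintro ⟨i, j⟩ _; simp

-- ===== VERDICT (by name: the statement is the Claim_ definition above) =====
theorem solution_spec : Claim_equal_solution := by
  intro board k _ _
  unfold Spec_solution
  have hA : solution board k
      = ∑ i ∈ Finset.Ico 0 (board.length : Int),
          ∑ j ∈ Finset.Ico 0 (if board ≠ [] then ((board.headD []).length : Int) else 0),
            (if i + j ≤ k then
              PySem.List.pyGetD (PySem.List.pyGetD board i []) j 0 else 0) :=
    double_foldl_A _ _ _ _
  have hB : solution_alt board k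
      = ∑ d ∈ Finset.Ico 0 (min (k + 1)
            ((board.length : Int) + (if board ≠ [] then ((board.headD []).length : Int) else 0) - 1)),
          ∑ i ∈ Finset.Ico
              (max 0 (d - (if board ≠ [] then ((board.headD []).length : Int) else 0) + 1))
              (min d ((board.length : Int) - 1) + 1),
            PySem.List.pyGetD (PySem.List.pyGetD board i []) (d - i) 0 :=
    double_foldl_B _ _ _ _
  rw [hA, hB]
  exact diag_reindex _ _ _ _
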